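-- pv_equiv track=rewrite | github.com/jinyoong/SWEA | problem/D3/5356. 의석이의 세로로 말해요.py | sero
-- ===== SOURCE A (Python) =====
-- def sero(input_str):
--     # 입력받는 문자열은 5줄이 입력되지만
--     # 각 줄의 문자열의 길이는 전부 다를 수 있다
--     # 따라서 try ~ except 문을 사용하여 해당 인덱스로 문자열에 접근할 수 있을 때만
--     # 결과 문자열에 저장하는 방법을 사용하자
--
--     # 탐색을 시작할 열과, 최종 문자열을 담을 빈 문자열을 초기화하자
--     start_idx = 0
--     result = ''
--
--     while True:
--         # 각 열의 문자들을 모두 더할 임시 문자열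
--         # temp 를 빈 문자열로 초기화하자
--         temp = ''
--
--         # 문자열은 무조건 5 줄이 들어오므로 5번 반복한다
--         for i in range(5):
--             try:
--                 # 만약 i 행의 start_idx 열의 값을 alpha 에 저장한다고 해보자
--                 alpha = input_str[i][start_idx]
--             except:
--                 # 위의 과정에서 오류(index out of range) 가 발생한다면
--                 # 그냥 넘어가고
--                 pass
--             else:
--                 # 오류가 발생하지 않으면 temp 문자열에 추가한다
--                 temp += alpha
--
--         # start_idx 열의 모든 문자를 나열했다면
--         # 다음 열을 봐야 하므로 1을 더해주자
--         start_idx += 1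
--
--         # 만약 start_idx 열의 5개 행을 전부 살펴봤는데
--         # 전부 오류가 발생한다면 빈 문자열이 나올테니까
--         # 이 경우에 while 문을 빠져나가자
--         if temp:
--             result += temp
--         else:
--             break
--
--     return result
-- ===== SOURCE B (Python) =====
-- def sero(input_str):
--     # Decorate-sort-undecorate: collect every character cell row by row,
--     # tagged with its linearised column-major position 5*col + row, then a
--     # single stable sort by that position yields the vertical reading order.
--     cells = [(5 * c + r, ch)
--              for r, row in enumerate(input_str[:5])
--              for c, ch in enumerate(row)]
--     cells.sort(key=lambda t: t[0])
--     return ''.join(ch for _, ch in cells)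
-- ===== Notes on version B (the rewrite author's own statement) =====
-- stated objective: alternative
-- what changed: Instead of A's column-by-column while-loop with try/except bounds checks and an empty-column sentinel break, B enumerates all character cells row-major, tags each with its linearised column-major position 5*col+row, sorts once by that key (decorate-sort-undecorate) and joins.
import Mathlib
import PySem

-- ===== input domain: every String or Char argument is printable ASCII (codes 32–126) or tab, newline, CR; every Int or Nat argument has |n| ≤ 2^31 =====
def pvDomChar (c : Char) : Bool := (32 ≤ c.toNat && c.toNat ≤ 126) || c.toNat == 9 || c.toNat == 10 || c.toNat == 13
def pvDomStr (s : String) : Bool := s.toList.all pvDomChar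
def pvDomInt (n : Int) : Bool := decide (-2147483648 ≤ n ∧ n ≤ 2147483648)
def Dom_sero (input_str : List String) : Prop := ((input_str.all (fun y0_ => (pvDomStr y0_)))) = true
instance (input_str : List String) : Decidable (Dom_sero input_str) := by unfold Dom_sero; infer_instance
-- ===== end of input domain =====

-- B replaces A's column-by-column while-loop (try/except bounds checks, empty-column
-- sentinel break) by decorate-sort-undecorate: enumerate all cells row-major tagged with
-- the position 5*col+row, sort once by that key, join. Equal return value everywhere.

-- ===== PORT A =====

-- the characters of column `idx` read from the first five rows (used to justify
-- termination of A's while-loop; cited by `decreasing_by`)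
def seroCol (input_str : List String) (idx : Nat) : List Char :=
  (input_str.take 5).filterMap (fun s => s.toList[idx]?)

-- the largest row length among the first five rows
def seroMax (input_str : List String) : Nat :=
  (input_str.take 5).foldr (fun s m => max s.toList.length m) 0

-- one step of the inner loop: try input_str[i][start_idx]; on IndexError keep temp,
-- else append the character
def seroStep (input_str : List String) (idx : Nat) (temp : String) (i : Int) : String :=
  match (PySem.List.pyGet? input_str i).bind
          (fun s => PySem.Str.pyGet? s (idx : Int)) with
  | some a => temp ++ String.singleton a
  | none => temp

-- inner `for i in range(5)` building `temp` with try/except on input_str[i][start_idx]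
def seroTemp (input_str : List String) (idx : Nat) : String :=
  (PySem.List.pyRange 0 5 1).foldl (seroStep input_str idx) ""

theorem seroTemp_toList (input_str : List String) (idx : Nat) :
    (seroTemp input_str idx).toList = seroCol input_str idx := by
  have gen : ∀ (k : Nat) (acc : String),
      ((PySem.List.pyRange 0 k 1).foldl (seroStep input_str idx) acc).toList
      = acc.toList ++ (input_str.take k).filterMap (fun s => s.toList[idx]?) := by
    intro k
    induction k with
    | zero => intro acc; simp [PySem.List.pyRange_one_eq_nil]
    | succ k ih =>
      intro acc
      have hsplit : PySem.List.pyRange 0 ((k+1 : Nat) : Int) 1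
          = PySem.List.pyRange 0 k 1 ++ [(k : Int)] := by
        rw [show (((k+1 : Nat)) : Int) = (k : Int) + 1 by push_cast; ring]
        have := PySem.List.pyRange_one_succ_right (a := 0) (b := (k : Int))
          (by exact_mod_cast Nat.zero_le k)
        simpa using this
      have hget : PySem.List.pyGet? input_str ((k : Int)) = input_str[k]? := by
        simpa using PySem.List.pyGet?_of_nonneg (xs := input_str) (i := (k : Int))
          (by exact_mod_cast Nat.zero_le k)
      have htake : input_str.take (k+1)
          = input_str.take k ++ (input_str[k]?).toList := List.take_succ
      rw [hsplit, List.foldl_append, List.foldl_cons, List.foldl_nil,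
        htake, List.filterMap_append]
      simp only [seroStep, hget]
      cases hk : input_str[k]? with
      | none => simpa using ih acc
      | some str =>
        cases hc : str.toList[idx]? with
        | none => simpa [hc] using ih acc
        | some a =>
          simp only [hc, PySem.Str.pyGet?_natCast, Option.bind_some, Option.toList_some,
            List.filterMap_cons, List.filterMap_nil, String.toList_append,
            String.toList_singleton, ih acc, List.append_assoc]
  simpa [seroTemp, seroCol] using gen 5 ""

theorem seroCol_ne_nil_iff (input_str : List String) (idx : Nat) :
    seroCol input_str idx ≠ [] ↔ idx < seroMax input_str := by
  unfold seroCol seroMax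
  induction input_str.take 5 with
  | nil => simp
  | cons s l ih =>
    rw [List.filterMap_cons, List.foldr_cons]
    cases hc : s.toList[idx]? with
    | none =>
      have hlen : s.toList.length ≤ idx := List.getElem?_eq_none_iff.mp hc
      rw [ih]
      omega
    | some a =>
      have hlt : idx < s.toList.length := (List.getElem?_eq_some_iff.mp hc).1
      refine ⟨fun _ => by omega, fun _ => by simp⟩

theorem seroTemp_lt_of_ne (input_str : List String) (idx : Nat)
    (h : seroTemp input_str idx ≠ "") : seroMax input_str - (idx + 1) < seroMax input_str - idx := by
  have hcol : seroCol input_str idx ≠ [] := by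
    intro hnil
    apply h
    have ht : (seroTemp input_str idx).toList = [] := by
      rw [seroTemp_toList, hnil]
    have := congrArg String.ofList ht
    simpa [String.ofList_toList] using this
  have := (seroCol_ne_nil_iff input_str idx).mp hcol
  omega

-- the `while True` loop over start_idx
def seroGo (input_str : List String) (idx : Nat) : String :=
  let temp := seroTemp input_str idx
  if _h : temp = "" then "" else temp ++ seroGo input_str (idx + 1)
termination_by seroMax input_str - idx
decreasing_by exact seroTemp_lt_of_ne input_str idx _h

def sero (input_str : List String) : String := seroGo input_str 0

-- ===== PORT B =====
def sero_alt (input_str : List String) : String :=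
  let cells := (PySem.List.enumerate (PySem.List.slice input_str none (some 5))).flatMap
    (fun p => (PySem.List.enumerate p.2.toList).map (fun q => (5 * q.1 + p.1, q.2)))
  String.ofList ((PySem.List.sorted cells (fun t => t.1)).map (fun t => t.2))

-- ===== PRECONDITION & SPEC =====
def Spec_sero (input_str : List String) (out : String) : Prop := out = sero_alt input_str
instance (input_str : List String) (out : String) : Decidable (Spec_sero input_str out) := by unfold Spec_sero; infer_instance

-- ===== CLAIM (what is proved, stated in full; the proofs are below) =====
def Claim_equal_sero : Prop := ∀ (input_str : List String), Dom_sero input_str → Spec_sero input_str (sero input_str)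

-- ===== LEMMAS AND PROOFS =====

-- B's decorated cell list, row-major (over an already-enumerated row list)
def seroCells (L : List (Int × String)) : List (Int × Char) :=
  L.flatMap (fun p => (PySem.List.enumerate p.2.toList).map (fun q => (5 * q.1 + p.1, q.2)))

-- the same cells in column-major order, columns 0..n-1
def seroColsK (n : Nat) (L : List (Int × String)) : List (Int × Char) :=
  (List.range n).flatMap
    (fun (c : Nat) => L.filterMap (fun p => (p.2.toList[c]?).map (fun ch => (5 * (c : Int) + p.1, ch))))

theorem mk_append (l m : List Char) : String.ofList l ++ String.ofList m = String.ofList (l ++ m) :=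
  Eq.symm String.ofList_append

theorem seroGo_eq (input_str : List String) : ∀ (d idx : Nat),
    seroMax input_str - idx = d →
    seroGo input_str idx = String.ofList ((List.range' idx d).flatMap (seroCol input_str)) := by
  intro d
  induction d with
  | zero =>
    intro idx hd
    have hcol : seroCol input_str idx = [] := by
      by_contra h
      have := (seroCol_ne_nil_iff input_str idx).mp h
      omega
    have htemp : seroTemp input_str idx = "" := by
      have ht : (seroTemp input_str idx).toList = [] := by
        rw [seroTemp_toList, hcol]
      have := congrArg String.ofList ht
      simpa [String.ofList_toList] using this
    rw [seroGo]
    simp [htemp, String.ofList_nil]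
  | succ d ih =>
    intro idx hd
    have hlt : idx < seroMax input_str := by omega
    have hcol : seroCol input_str idx ≠ [] :=
      (seroCol_ne_nil_iff input_str idx).mpr hlt
    have htemp : seroTemp input_str idx ≠ "" := by
      intro h
      apply hcol
      have := seroTemp_toList input_str idx
      rw [h] at this
      exact this.symm
    rw [seroGo]
    simp only [htemp, dite_false, dif_neg]
    rw [ih (idx + 1) (by omega)]
    have hrange : List.range' idx (d+1) = idx :: List.range' (idx+1) d := by
      simp [List.range'_succ]
    rw [hrange, List.flatMap_cons]
    have h1 : seroTemp input_str idx = String.ofList (seroCol input_str idx) := by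
      rw [← seroTemp_toList, String.ofList_toList]
    rw [h1, mk_append]

theorem filterMap_cons_toList {α β : Type} (f : α → Option β) (a : α) (l : List α) :
    List.filterMap f (a :: l) = (f a).toList ++ List.filterMap f l := by
  cases h : f a <;> simp [List.filterMap_cons, h]

theorem flatMap_append_perm {α β : Type} (l : List α) (f g : α → List β) :
    (l.flatMap (fun c => f c ++ g c)).Perm (l.flatMap f ++ l.flatMap g) := by
  induction l with
  | nil => simp
  | cons c t ih =>
    simp only [List.flatMap_cons]
    refine (List.Perm.append_left (f c ++ g c) ih).trans ?_
    rw [List.append_assoc (f c) (g c), List.append_assoc (f c) (t.flatMap f)]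
    exact List.Perm.append_left (f c) (List.perm_append_comm_assoc _ _ _)

-- one row's cells, read column by column over a wide-enough range, in row order
theorem row_cells_eq (i : Int) (xs : List Char) : ∀ (n : Nat), xs.length ≤ n →
    (List.range n).flatMap (fun (c : Nat) => ((xs[c]?).map (fun ch => (5 * (c : Int) + i, ch))).toList)
    = (PySem.List.enumerate xs).map (fun q => (5 * q.1 + i, q.2)) := by
  intro n hn
  obtain ⟨k, rfl⟩ : ∃ k, n = xs.length + k := ⟨n - xs.length, by omega⟩
  induction k with
  | zero =>
    simp only [Nat.add_zero]
    have hmap : (List.range xs.length).map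
        (fun (c : Nat) => ((xs[c]?).map (fun ch => (5 * (c : Int) + i, ch))).toList)
        = (List.range xs.length).map (fun (c : Nat) => [(5 * (c : Int) + i, xs.getD c default)]) := by
      apply List.map_congr_left
      intro c hc
      have hc' : c < xs.length := List.mem_range.mp hc
      simp [List.getElem?_eq_getElem hc', List.getD, hc']
    rw [List.flatMap_def, hmap, ← List.flatMap_def]
    rw [← List.flatMap_map (f := fun (c : Nat) => ((5 * (c : Int) + i, xs.getD c default) : Int × Char))
      (g := fun x => [x]), List.flatMap_singleton']
    apply List.ext_getElem
    · simp [PySem.List.length_enumerate]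
    · intro k hk1 hk2
      have hk : k < xs.length := by simpa using hk1
      simp [PySem.List.getElem_enumerate, List.getD, hk]
  | succ k ih =>
    rw [show xs.length + (k+1) = (xs.length + k) + 1 from rfl, List.range_succ,
      List.flatMap_append, ih (by omega)]
    have hnone : xs[xs.length + k]? = none := by
      apply List.getElem?_eq_none
      omega
    simp [hnone]

theorem seroCells_perm_cols : ∀ (L : List (Int × String)) (n : Nat),
    (∀ p ∈ L, p.2.toList.length ≤ n) → (seroCells L).Perm (seroColsK n L) := by
  intro L
  induction L with
  | nil => intro n _; simp [seroCells, seroColsK]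
  | cons p rest ih =>
    intro n hlen
    have hcols : seroColsK n (p :: rest)
        = (List.range n).flatMap (fun (c : Nat) =>
            ((p.2.toList[c]?).map (fun ch => (5 * (c : Int) + p.1, ch))).toList
            ++ rest.filterMap (fun q => (q.2.toList[c]?).map (fun ch => (5 * (c : Int) + q.1, ch)))) := by
      unfold seroColsK
      congr 1
      funext c
      exact filterMap_cons_toList _ p rest
    have hperm1 := flatMap_append_perm (List.range n)
      (fun (c : Nat) => ((p.2.toList[c]?).map (fun ch => (5 * (c : Int) + p.1, ch))).toList)
      (fun (c : Nat) => rest.filterMap (fun q => (q.2.toList[c]?).map (fun ch => (5 * (c : Int) + q.1, ch))))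
    have hrow := row_cells_eq p.1 p.2.toList n (hlen p (by simp))
    have hrest : (seroCells rest).Perm (seroColsK n rest) :=
      ih n (fun q hq => hlen q (by simp [hq]))
    rw [hcols]
    refine List.Perm.trans ?_ hperm1.symm
    rw [hrow]
    show (seroCells (p :: rest)).Perm _
    unfold seroCells
    rw [List.flatMap_cons]
    exact List.Perm.append_left _ hrest

theorem seroColsK_pairwise (L : List (Int × String)) (n : Nat)
    (hP : L.Pairwise (fun p q => p.1 < q.1)) (hB : ∀ p ∈ L, 0 ≤ p.1 ∧ p.1 < 5) :
    (seroColsK n L).Pairwise (fun a b => a.1 < b.1) := by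
  unfold seroColsK
  rw [List.pairwise_flatMap]
  constructor
  · intro c _
    refine List.Pairwise.filterMap _ ?_ hP
    intro p q hpq b hb b' hb'
    obtain ⟨ch, _, rfl⟩ := Option.map_eq_some_iff.mp hb
    obtain ⟨ch', _, rfl⟩ := Option.map_eq_some_iff.mp hb'
    simpa using hpq
  · refine List.Pairwise.imp ?_ List.pairwise_lt_range
    intro c₁ c₂ hc x hx y hy
    obtain ⟨p, hpL, hp⟩ := List.mem_filterMap.mp hx
    obtain ⟨q, hqL, hq⟩ := List.mem_filterMap.mp hy
    obtain ⟨ch, _, rfl⟩ := Option.map_eq_some_iff.mp hp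
    obtain ⟨ch', _, rfl⟩ := Option.map_eq_some_iff.mp hq
    have h1 := hB p hpL
    have h2 := hB q hqL
    simp only []
    have : (c₁ : Int) < (c₂ : Int) := by exact_mod_cast hc
    omega

theorem seroColsK_map_snd (n : Nat) : ∀ (L : List (Int × String)),
    (seroColsK n L).map (fun t => t.2)
    = (List.range n).flatMap (fun (c : Nat) => (L.map (fun p => p.2)).filterMap (fun s => s.toList[c]?)) := by
  have inner : ∀ (c : Nat) (L : List (Int × String)),
      (L.filterMap (fun p => (p.2.toList[c]?).map (fun ch => (5 * (c : Int) + p.1, ch)))).map (fun t => t.2)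
      = (L.map (fun p => p.2)).filterMap (fun s => s.toList[c]?) := by
    intro c L
    induction L with
    | nil => simp
    | cons p rest ih =>
      cases h : p.2.toList[c]? with
      | none => simp [List.filterMap_cons, h, ih]
      | some ch => simp [List.filterMap_cons, h, ih]
  intro L
  unfold seroColsK
  rw [List.map_flatMap]
  congr 1
  funext c
  exact inner c L

theorem len_le_foldrMax : ∀ (l : List String) (s : String), s ∈ l →
    s.toList.length ≤ l.foldr (fun s m => max s.toList.length m) 0 := by
  intro l
  induction l with
  | nil => intro s hs; simp at hs
  | cons h t ih =>
    intro s hs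
    rw [List.foldr_cons]
    rcases List.mem_cons.mp hs with rfl | hs'
    · exact Nat.le_max_left _ _
    · exact Nat.le_trans (ih s hs') (Nat.le_max_right _ _)

theorem sero_alt_eq (input_str : List String) :
    sero_alt input_str
    = String.ofList ((List.range (seroMax input_str)).flatMap (seroCol input_str)) := by
  unfold sero_alt
  have hslice : PySem.List.slice input_str none (some 5) = input_str.take 5 := by
    simpa using PySem.List.slice_to (xs := input_str) (b := 5) (by norm_num)
  rw [hslice]
  set L := PySem.List.enumerate (input_str.take 5) with hL
  have hcells : (L.flatMap (fun p => (PySem.List.enumerate p.2.toList).map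
      (fun q => (5 * q.1 + p.1, q.2)))) = seroCells L := rfl
  show String.ofList (((PySem.List.sorted (seroCells L) (fun t => t.1))).map (fun t => t.2))
      = String.ofList ((List.range (seroMax input_str)).flatMap (seroCol input_str))
  have hlenL : ∀ p ∈ L, p.2.toList.length ≤ seroMax input_str := by
    intro p hp
    obtain ⟨k, hk, rfl⟩ := (PySem.List.mem_enumerate_iff _ _ _).mp hp
    exact len_le_foldrMax (input_str.take 5) _ (List.getElem_mem hk)
  have hPL : L.Pairwise (fun p q => p.1 < q.1) := PySem.List.pairwise_lt_enumerate _ _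
  have hBL : ∀ p ∈ L, 0 ≤ p.1 ∧ p.1 < 5 := by
    intro p hp
    obtain ⟨k, hk, rfl⟩ := (PySem.List.mem_enumerate_iff _ _ _).mp hp
    have hk5 : k < 5 := by
      have := List.length_take_le 5 input_str
      omega
    constructor
    · simp
    · simp; omega
  have hsorted : PySem.List.sorted (seroCells L) (fun t => t.1)
      = seroColsK (seroMax input_str) L :=
    PySem.List.sorted_eq_of_perm_of_pairwise_lt _ _ _
      (seroCells_perm_cols L _ hlenL).symm
      (seroColsK_pairwise L _ hPL hBL)
  rw [hsorted, seroColsK_map_snd]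
  have hmapL : L.map (fun p => p.2) = input_str.take 5 := PySem.List.map_snd_enumerate _ _
  rw [hmapL]
  rfl

-- ===== VERDICT (by name: the statement is the Claim_ definition above) =====
theorem sero_spec : Claim_equal_sero := by
  intro input_str _
  unfold Spec_sero sero
  rw [seroGo_eq input_str (seroMax input_str) 0 (by omega), sero_alt_eq]
  rw [List.range_eq_range']
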